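-- pv_equiv track=rewrite | github.com/mohitchandan/mohitchandan | Python/Adventofcode/Problem3-Part2.py | getcommoninlist
-- ===== SOURCE A (Python) =====
-- slen = 11
--
-- def getcommoninlist(lst1in, gvmecommon) :
--     i = 0
--     lstv1 = list()
--     lstv = list()
--     xv = ''
--     xv1 = ''
--     while i <= slen :
--         cnt = 0
--         cnt1 = 0
--         for x in lst1in :
--             tval = tuple(x)
--             if tval[i] == '1' :
--                 cnt1 = cnt1 + 1
--             if tval[i] == '0' :
--                 cnt = cnt + 1
--         if cnt1 < cnt :
--             lstv.append('0')
--             lstv1.append('1')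
--         else :
--             lstv.append('1')
--             lstv1.append('0')
--         i = i + 1
--     #mostcommon
--     for lv in range(len(lstv)):
--         xv = xv + lstv[lv]
--     #print (xv)
--     #most uncommon
--     for lv1 in range(len(lstv1)):
--         xv1 = xv1 + lstv1[lv1]
--     #print (xv1)
--     if gvmecommon == 1:
--         return(lstv)
--     else :
--         return(lstv1)
-- ===== SOURCE B (Python) =====
-- def getcommoninlist(lst1in, gvmecommon):
--     ones = [0] * 12
--     zeros = [0] * 12
--     for x in lst1in:
--         ones = [v + (1 if x[i] == '1' else 0) for i, v in enumerate(ones)]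
--         zeros = [v + (1 if x[i] == '0' else 0) for i, v in enumerate(zeros)]
--     lstv = ['0' if ones[i] < zeros[i] else '1' for i in range(12)]
--     lstv1 = ['1' if ones[i] < zeros[i] else '0' for i in range(12)]
--     return lstv if gvmecommon == 1 else lstv1
-- ===== Notes on version B (the rewrite author's own statement) =====
-- stated objective: alternative
-- what changed: B makes a single pass over the strings, maintaining per-column ones/zeros counters rebuilt by comprehension, instead of A's outer loop over the 12 columns each rescanning the whole list; the dead xv/xv1 string building is dropped.
import Mathlib
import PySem

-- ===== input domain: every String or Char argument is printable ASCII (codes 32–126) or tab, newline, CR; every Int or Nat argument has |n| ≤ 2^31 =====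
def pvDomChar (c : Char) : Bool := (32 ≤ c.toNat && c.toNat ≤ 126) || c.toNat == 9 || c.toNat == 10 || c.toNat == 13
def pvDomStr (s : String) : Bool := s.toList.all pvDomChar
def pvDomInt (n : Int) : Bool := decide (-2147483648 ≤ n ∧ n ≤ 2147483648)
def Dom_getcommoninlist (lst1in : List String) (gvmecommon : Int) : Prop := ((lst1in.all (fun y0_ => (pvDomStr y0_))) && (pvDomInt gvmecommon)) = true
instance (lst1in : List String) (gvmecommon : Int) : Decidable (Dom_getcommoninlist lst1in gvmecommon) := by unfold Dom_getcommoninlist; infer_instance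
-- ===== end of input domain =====

-- B replaces A's outer loop over the 12 columns (each rescanning the whole list) by a single
-- pass over the strings maintaining per-column ones/zeros counters, and drops the dead xv/xv1
-- string building; objective: alternative decomposition, same cost.

-- ===== PORT A =====
-- inner 'for x in lst1in' loop of A: state (cnt, cnt1) = (zeros, ones) at column i
def pvACount (lst1in : List String) (i : Nat) : Int × Int :=
  lst1in.foldl (fun c x =>
    let tval := x.toList
    let c := if PySem.List.pyGet? tval (i : Int) = some '1' then (c.1, c.2 + 1) else c
    if PySem.List.pyGet? tval (i : Int) = some '0' then (c.1 + 1, c.2) else c)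
    (0, 0)

def getcommoninlist (lst1in : List String) (gvmecommon : Int) : List String :=
  -- while i <= slen (slen = 11): i = 0,…,11, building (lstv, lstv1)
  let p := (List.range 12).foldl (fun (st : List String × List String) i =>
    let c := pvACount lst1in i
    if c.2 < c.1 then (st.1 ++ ["0"], st.2 ++ ["1"])
    else (st.1 ++ ["1"], st.2 ++ ["0"])) ([], [])
  -- dead xv/xv1 concatenation loops of A (results unused)
  let _xv := p.1.foldl (fun s v => s ++ v) ""
  let _xv1 := p.2.foldl (fun s v => s ++ v) ""
  if gvmecommon = 1 then p.1 else p.2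

-- ===== PORT B =====
-- one string's contribution: rebuild ones/zeros by indexed comprehension
def pvAltStep (x : String) (oz : List Int × List Int) : List Int × List Int :=
  (oz.1.mapIdx (fun i v => v + (if PySem.List.pyGet? x.toList (i : Int) = some '1' then 1 else 0)),
   oz.2.mapIdx (fun i v => v + (if PySem.List.pyGet? x.toList (i : Int) = some '0' then 1 else 0)))

def getcommoninlist_alt (lst1in : List String) (gvmecommon : Int) : List String :=
  let oz := lst1in.foldl (fun oz x => pvAltStep x oz)
    (List.replicate 12 0, List.replicate 12 0)
  let lstv := (List.range 12).map (fun i => if oz.1[i]! < oz.2[i]! then "0" else "1")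
  let lstv1 := (List.range 12).map (fun i => if oz.1[i]! < oz.2[i]! then "1" else "0")
  if gvmecommon = 1 then lstv else lstv1

-- ===== PRECONDITION & SPEC =====
-- Pre_ excludes inputs containing a string shorter than 12 characters, on which Python A
-- raises IndexError (and Python B raises the same).
def Pre_getcommoninlist (lst1in : List String) (gvmecommon : Int) : Prop :=
  ∀ s ∈ lst1in, 12 ≤ s.length
instance (lst1in : List String) (gvmecommon : Int) : Decidable (Pre_getcommoninlist lst1in gvmecommon) := by unfold Pre_getcommoninlist; infer_instance

def pvWitness_getcommoninlist : List String × Int := (["101100111010", "001100111011"], 1)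

def Spec_getcommoninlist (lst1in : List String) (gvmecommon : Int) (out : List String) : Prop := out = getcommoninlist_alt lst1in gvmecommon
instance (lst1in : List String) (gvmecommon : Int) (out : List String) : Decidable (Spec_getcommoninlist lst1in gvmecommon out) := by unfold Spec_getcommoninlist; infer_instance

-- ===== CLAIM (what is proved, stated in full; the proofs are below) =====
def Claim_equal_getcommoninlist : Prop := ∀ (lst1in : List String) (gvmecommon : Int), Dom_getcommoninlist lst1in gvmecommon → Pre_getcommoninlist lst1in gvmecommon → Spec_getcommoninlist lst1in gvmecommon (getcommoninlist lst1in gvmecommon)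

-- ===== LEMMAS AND PROOFS =====

-- A's inner fold from an arbitrary accumulator just shifts the count from (0,0)
theorem pvACount_from (lst : List String) (i : Nat) (c : Int × Int) :
    lst.foldl (fun c x =>
      let tval := x.toList
      let c := if PySem.List.pyGet? tval (i : Int) = some '1' then (c.1, c.2 + 1) else c
      if PySem.List.pyGet? tval (i : Int) = some '0' then (c.1 + 1, c.2) else c) c
    = (c.1 + (pvACount lst i).1, c.2 + (pvACount lst i).2) := by
  induction lst generalizing c with
  | nil => simp [pvACount]
  | cons x xs ih =>
    simp only [pvACount, List.foldl_cons] at *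
    rw [ih, ih ((fun c x =>
      let tval := x.toList
      let c := if PySem.List.pyGet? tval (i : Int) = some '1' then (c.1, c.2 + 1) else c
      if PySem.List.pyGet? tval (i : Int) = some '0' then (c.1 + 1, c.2) else c) (0,0) x)]
    simp only
    split_ifs <;> simp <;> ring_nf <;> simp

theorem pvAltStep_len (x : String) (oz : List Int × List Int) :
    (pvAltStep x oz).1.length = oz.1.length ∧ (pvAltStep x oz).2.length = oz.2.length := by
  simp [pvAltStep]

-- key invariant: B's fold, read at column j, is the initial value plus A's per-column count
theorem pvFold_get (lst : List String) (oz : List Int × List Int) (j : Nat)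
    (h1 : j < oz.1.length) (h2 : j < oz.2.length) :
    (lst.foldl (fun oz x => pvAltStep x oz) oz).1[j]! = oz.1[j]! + (pvACount lst j).2
    ∧ (lst.foldl (fun oz x => pvAltStep x oz) oz).2[j]! = oz.2[j]! + (pvACount lst j).1 := by
  induction lst generalizing oz with
  | nil => simp [pvACount]
  | cons x xs ih =>
    have hl := pvAltStep_len x oz
    have h1' : j < (pvAltStep x oz).1.length := by omega
    have h2' : j < (pvAltStep x oz).2.length := by omega
    have := ih (pvAltStep x oz) h1' h2'
    simp only [List.foldl_cons]
    rcases this with ⟨e1, e2⟩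
    rw [e1, e2]
    have g1 : (pvAltStep x oz).1[j]! = oz.1[j]! + (if PySem.List.pyGet? x.toList (j : Int) = some '1' then 1 else 0) := by
      simp [pvAltStep, getElem!_pos, List.getElem_mapIdx, h1]
    have g2 : (pvAltStep x oz).2[j]! = oz.2[j]! + (if PySem.List.pyGet? x.toList (j : Int) = some '0' then 1 else 0) := by
      simp [pvAltStep, getElem!_pos, List.getElem_mapIdx, h2]
    have hc : pvACount (x :: xs) j =
        ((if PySem.List.pyGet? x.toList (j : Int) = some '0' then 1 else 0) + (pvACount xs j).1,
         (if PySem.List.pyGet? x.toList (j : Int) = some '1' then 1 else 0) + (pvACount xs j).2) := by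
      conv_lhs => simp only [pvACount, List.foldl_cons]
      rw [pvACount_from]
      split_ifs with hA hB hB <;> simp_all
    rw [g1, g2, hc]
    constructor <;> ring

-- A's outer while-loop fold builds the two lists as maps over the column range
theorem pvAFold (lst1in : List String) (n : Nat) (a b : List String) :
    (List.range n).foldl (fun (st : List String × List String) i =>
      let c := pvACount lst1in i
      if c.2 < c.1 then (st.1 ++ ["0"], st.2 ++ ["1"])
      else (st.1 ++ ["1"], st.2 ++ ["0"])) (a, b)
    = (a ++ (List.range n).map (fun i => if (pvACount lst1in i).2 < (pvACount lst1in i).1 then "0" else "1"),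
       b ++ (List.range n).map (fun i => if (pvACount lst1in i).2 < (pvACount lst1in i).1 then "1" else "0")) := by
  induction n generalizing a b with
  | zero => simp
  | succ m ih =>
    rw [List.range_succ, List.foldl_append, ih]
    simp only [List.foldl_cons, List.foldl_nil, List.map_append, List.map_cons, List.map_nil]
    split_ifs <;> simp

-- ===== VERDICT (by name: the statement is the Claim_ definition above) =====
theorem getcommoninlist_spec : Claim_equal_getcommoninlist := by
  intro lst1in gvmecommon _ _
  unfold Spec_getcommoninlist getcommoninlist getcommoninlist_alt
  rw [pvAFold]
  have hget : ∀ j : Nat, j < 12 →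
      ((lst1in.foldl (fun oz x => pvAltStep x oz) (List.replicate 12 0, List.replicate 12 0)).1[j]!
        = (pvACount lst1in j).2
      ∧ (lst1in.foldl (fun oz x => pvAltStep x oz) (List.replicate 12 0, List.replicate 12 0)).2[j]!
        = (pvACount lst1in j).1) := by
    intro j hj
    have := pvFold_get lst1in (List.replicate 12 0, List.replicate 12 0) j
      (by simpa using hj) (by simpa using hj)
    have hz : (List.replicate 12 (0:Int))[j]! = 0 := by
      rw [getElem!_pos _ _ (by simpa using hj)]; exact List.getElem_replicate _
    simp only [hz] at this
    simpa using this
  have hmap : ∀ (f g : Nat → String),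
      (∀ j ∈ List.range 12, f j = g j) → (List.range 12).map f = (List.range 12).map g :=
    fun f g h => List.map_congr_left h
  simp only
  have e1 := hmap _ _ (fun j hj => by
    have hj' : j < 12 := List.mem_range.mp hj
    rcases hget j hj' with ⟨a1, a2⟩
    show (if (pvACount lst1in j).2 < (pvACount lst1in j).1 then "0" else "1")
      = (if (lst1in.foldl (fun oz x => pvAltStep x oz) (List.replicate 12 0, List.replicate 12 0)).1[j]!
          < (lst1in.foldl (fun oz x => pvAltStep x oz) (List.replicate 12 0, List.replicate 12 0)).2[j]! then "0" else "1")
    rw [a1, a2])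
  have e2 := hmap _ _ (fun j hj => by
    have hj' : j < 12 := List.mem_range.mp hj
    rcases hget j hj' with ⟨a1, a2⟩
    show (if (pvACount lst1in j).2 < (pvACount lst1in j).1 then "1" else "0")
      = (if (lst1in.foldl (fun oz x => pvAltStep x oz) (List.replicate 12 0, List.replicate 12 0)).1[j]!
          < (lst1in.foldl (fun oz x => pvAltStep x oz) (List.replicate 12 0, List.replicate 12 0)).2[j]! then "1" else "0")
    rw [a1, a2])
  split_ifs <;> simp [e1, e2]
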